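-- pv_equiv track=rewrite | github.com/hoininsight-commits/hoininsight | temp_recover/remote_verify_is101/src/ops/content_preset_selector.py | select_content_preset
-- ===== SOURCE A (Python) =====
-- from typing import Any, Dict
--
-- def select_content_preset(regime_text: str, confidence: str, has_meta_topic: bool = False) -> Dict[str, str]:
--     """
--     Selects the Content Preset (BRIEF/STANDARD/DEEP) based on Confidence and Regime.
--
--     Rules:
--     1) Confidence=HIGH
--        - Default: STANDARD
--        - Upgrade to DEEP if Regime contains Risk/Crisis keywords.
--     2) Confidence=MEDIUM
--        - Default: BRIEF
--        - Upgrade to STANDARD if Regime contains Structural Shift keywords AND Meta Topic exists.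
--     3) Confidence=LOW
--        - (Usually SKIP, but if called returns BRIEF or SKIP) -> Returns BRIEF (safe fallback)
--
--     Returns:
--        dict: {"preset": "...", "reason": "..."}
--     """
--     regime_upper = regime_text.upper()
--
--     # 1. Keywords
--     joined_risk_keywords = ["RISK-OFF", "CRISIS", "STRESS", "LIQUIDITY", "RECESSION", "VOLATILITY"]
--     joined_struct_keywords = ["ROTATION", "DISINFLATION", "SOFT LANDING", "POLICY SHIFT"]
--
--     # Check matches
--     is_risk = any(k in regime_upper for k in joined_risk_keywords)
--     is_struct = any(k in regime_upper for k in joined_struct_keywords)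
--
--     preset = "STANDARD" # Default fallback
--     reason = "Default"
--
--     if confidence == "HIGH":
--         if is_risk:
--             preset = "DEEP"
--             reason = "HIGH Confidence + Risk/Crisis Regime detected"
--         else:
--             preset = "STANDARD"
--             reason = "HIGH Confidence (Risk factors not dominant)"
--
--     elif confidence == "MEDIUM":
--         if is_struct and has_meta_topic:
--             preset = "STANDARD"
--             reason = "MEDIUM Confidence + Structural Shift with Meta Topic"
--         else:
--             preset = "BRIEF"
--             reason = "MEDIUM Confidence (Default)"
--
--     elif confidence == "LOW":
--         preset = "BRIEF" # Should be skipped by Gate, but fallback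
--         reason = "LOW Confidence (Fallback)"
--
--     return {
--         "preset": preset,
--         "reason": reason
--     }
-- ===== SOURCE B (Python) =====
-- _KEYWORD_CATEGORY = {
--     "RISK-OFF": "risk", "CRISIS": "risk", "STRESS": "risk",
--     "LIQUIDITY": "risk", "RECESSION": "risk", "VOLATILITY": "risk",
--     "ROTATION": "struct", "DISINFLATION": "struct",
--     "SOFT LANDING": "struct", "POLICY SHIFT": "struct",
-- }
--
-- # per confidence level: (default (preset, reason),
-- #                        optional upgrade ((preset, reason), category, needs_meta))
-- _LEVELS = {
--     "HIGH": (("STANDARD", "HIGH Confidence (Risk factors not dominant)"),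
--              (("DEEP", "HIGH Confidence + Risk/Crisis Regime detected"), "risk", False)),
--     "MEDIUM": (("BRIEF", "MEDIUM Confidence (Default)"),
--                (("STANDARD", "MEDIUM Confidence + Structural Shift with Meta Topic"), "struct", True)),
--     "LOW": (("BRIEF", "LOW Confidence (Fallback)"), None),
-- }
--
-- def select_content_preset(regime_text: str, confidence: str, has_meta_topic: bool = False):
--     regime_upper = regime_text.upper()
--     # one pass over a keyword -> category map: the set of matched categories
--     matched = {cat for kw, cat in _KEYWORD_CATEGORY.items() if kw in regime_upper}
--     level = _LEVELS.get(confidence)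
--     if level is None:
--         return {"preset": "STANDARD", "reason": "Default"}
--     default, upgrade = level
--     if upgrade is not None:
--         (preset, reason), cat, needs_meta = upgrade
--         if cat in matched and (has_meta_topic or not needs_meta):
--             return {"preset": preset, "reason": reason}
--     return {"preset": default[0], "reason": default[1]}
-- ===== Notes on version B (the rewrite author's own statement) =====
-- stated objective: alternative
-- what changed: Replaces the if/elif cascade and the two per-list any() scans with a keyword->category map folded once into a set of matched categories, plus a confidence-keyed configuration dict of (default, optional upgrade rule) consulted by a single lookup.
import Mathlib
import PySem

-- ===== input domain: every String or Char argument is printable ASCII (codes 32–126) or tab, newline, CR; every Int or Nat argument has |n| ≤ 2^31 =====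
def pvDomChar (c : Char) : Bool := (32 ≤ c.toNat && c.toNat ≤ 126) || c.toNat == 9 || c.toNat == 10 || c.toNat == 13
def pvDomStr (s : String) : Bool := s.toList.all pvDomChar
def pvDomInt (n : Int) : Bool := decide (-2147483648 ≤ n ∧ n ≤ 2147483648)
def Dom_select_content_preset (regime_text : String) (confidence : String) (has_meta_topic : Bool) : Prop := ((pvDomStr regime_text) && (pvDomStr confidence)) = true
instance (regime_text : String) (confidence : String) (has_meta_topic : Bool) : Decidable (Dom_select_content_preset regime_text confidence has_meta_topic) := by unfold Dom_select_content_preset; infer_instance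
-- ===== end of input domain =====

-- B replaces the if/elif cascade and the two any() scans with a keyword->category map
-- folded into a set of matched categories plus a confidence-keyed config dict (alternative; same cost).

-- ===== PORT A =====
-- literal transliteration of A's nested cascade (the dict return is the assoc list)
def select_content_preset (regime_text : String) (confidence : String) (has_meta_topic : Bool) : List (String × String) :=
  let regime_upper := PySem.Str.upper regime_text
  let joined_risk_keywords := ["RISK-OFF", "CRISIS", "STRESS", "LIQUIDITY", "RECESSION", "VOLATILITY"]
  let joined_struct_keywords := ["ROTATION", "DISINFLATION", "SOFT LANDING", "POLICY SHIFT"]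
  let is_risk := joined_risk_keywords.any (fun k => PySem.Str.isIn k regime_upper)
  let is_struct := joined_struct_keywords.any (fun k => PySem.Str.isIn k regime_upper)
  let preset := "STANDARD"
  let reason := "Default"
  let pr :=
    if confidence == "HIGH" then
      if is_risk then
        ("DEEP", "HIGH Confidence + Risk/Crisis Regime detected")
      else
        ("STANDARD", "HIGH Confidence (Risk factors not dominant)")
    else if confidence == "MEDIUM" then
      if is_struct && has_meta_topic then
        ("STANDARD", "MEDIUM Confidence + Structural Shift with Meta Topic")
      else
        ("BRIEF", "MEDIUM Confidence (Default)")
    else if confidence == "LOW" then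
      ("BRIEF", "LOW Confidence (Fallback)")
    else
      (preset, reason)
  [("preset", pr.1), ("reason", pr.2)]

-- ===== PORT B =====
-- Source B's module constants: keyword -> category map, and the per-confidence config dict
def pvKeywordCategory : PySem.Dict String String :=
  PySem.Dict.ofList
    [("RISK-OFF", "risk"), ("CRISIS", "risk"), ("STRESS", "risk"),
     ("LIQUIDITY", "risk"), ("RECESSION", "risk"), ("VOLATILITY", "risk"),
     ("ROTATION", "struct"), ("DISINFLATION", "struct"),
     ("SOFT LANDING", "struct"), ("POLICY SHIFT", "struct")]

def pvLevels : PySem.Dict String ((String × String) × Option ((String × String) × String × Bool)) :=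
  PySem.Dict.ofList
  [("HIGH", (("STANDARD", "HIGH Confidence (Risk factors not dominant)"),
             some (("DEEP", "HIGH Confidence + Risk/Crisis Regime detected"), "risk", false))),
   ("MEDIUM", (("BRIEF", "MEDIUM Confidence (Default)"),
             some (("STANDARD", "MEDIUM Confidence + Structural Shift with Meta Topic"), "struct", true))),
   ("LOW", (("BRIEF", "LOW Confidence (Fallback)"), none))]

-- literal transliteration of Source B: set comprehension over the keyword map, then one config lookup
def select_content_preset_alt (regime_text : String) (confidence : String) (has_meta_topic : Bool) : List (String × String) :=
  let regime_upper := PySem.Str.upper regime_text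
  let matched : PySem.Set String :=
    PySem.Set.ofList ((pvKeywordCategory.items.filter (fun p => PySem.Str.isIn p.1 regime_upper)).map Prod.snd)
  match PySem.Dict.get? pvLevels confidence with
  | none => [("preset", "STANDARD"), ("reason", "Default")]
  | some (dflt, upgrade) =>
    match upgrade with
    | some (pr, cat, needs_meta) =>
      if PySem.Set.contains matched cat && (has_meta_topic || !needs_meta) then
        [("preset", pr.1), ("reason", pr.2)]
      else
        [("preset", dflt.1), ("reason", dflt.2)]
    | none => [("preset", dflt.1), ("reason", dflt.2)]

-- ===== PRECONDITION & SPEC =====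
def Spec_select_content_preset (regime_text : String) (confidence : String) (has_meta_topic : Bool) (out : List (String × String)) : Prop := out = select_content_preset_alt regime_text confidence has_meta_topic
instance (regime_text : String) (confidence : String) (has_meta_topic : Bool) (out : List (String × String)) : Decidable (Spec_select_content_preset regime_text confidence has_meta_topic out) := by unfold Spec_select_content_preset; infer_instance

-- ===== CLAIM (what is proved, stated in full; the proofs are below) =====
def Claim_equal_select_content_preset : Prop := ∀ (regime_text : String) (confidence : String) (has_meta_topic : Bool), Dom_select_content_preset regime_text confidence has_meta_topic → Spec_select_content_preset regime_text confidence has_meta_topic (select_content_preset regime_text confidence has_meta_topic)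

-- ===== LEMMAS AND PROOFS =====

-- the module-constant dicts' items, evaluated (keys are distinct, so ofList keeps them in order)
theorem items_pvKeywordCategory :
    pvKeywordCategory.items =
      [("RISK-OFF", "risk"), ("CRISIS", "risk"), ("STRESS", "risk"),
       ("LIQUIDITY", "risk"), ("RECESSION", "risk"), ("VOLATILITY", "risk"),
       ("ROTATION", "struct"), ("DISINFLATION", "struct"),
       ("SOFT LANDING", "struct"), ("POLICY SHIFT", "struct")] := by decide

theorem items_pvLevels :
    pvLevels.items =
      [("HIGH", (("STANDARD", "HIGH Confidence (Risk factors not dominant)"),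
                 some (("DEEP", "HIGH Confidence + Risk/Crisis Regime detected"), "risk", false))),
       ("MEDIUM", (("BRIEF", "MEDIUM Confidence (Default)"),
                 some (("STANDARD", "MEDIUM Confidence + Structural Shift with Meta Topic"), "struct", true))),
       ("LOW", (("BRIEF", "LOW Confidence (Fallback)"), none))] := by decide

-- ===== VERDICT (by name: the statement is the Claim_ definition above) =====
set_option maxHeartbeats 1600000 in
theorem select_content_preset_spec : Claim_equal_select_content_preset := by
  intro rt c m _
  unfold Spec_select_content_preset select_content_preset select_content_preset_alt
  by_cases h1 : c = "HIGH"
  · subst h1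
    simp only [PySem.Dict.get?, items_pvLevels]
    cases hr : (["RISK-OFF", "CRISIS", "STRESS", "LIQUIDITY", "RECESSION", "VOLATILITY"].any
        (fun k => PySem.Str.isIn k (PySem.Str.upper rt))) <;>
      simp [hr] <;> simp_all [items_pvKeywordCategory]
  · by_cases h2 : c = "MEDIUM"
    · subst h2
      simp only [PySem.Dict.get?, items_pvLevels]
      cases hs : (["ROTATION", "DISINFLATION", "SOFT LANDING", "POLICY SHIFT"].any
          (fun k => PySem.Str.isIn k (PySem.Str.upper rt))) <;> cases m <;>
        simp [hs] <;> simp_all [items_pvKeywordCategory]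
    · by_cases h3 : c = "LOW"
      · subst h3
        simp only [PySem.Dict.get?, items_pvLevels]
        simp
      · simp only [PySem.Dict.get?, items_pvLevels]
        simp [beq_eq_false_iff_ne.mpr h1, beq_eq_false_iff_ne.mpr h2, beq_eq_false_iff_ne.mpr h3,
              beq_eq_false_iff_ne.mpr (Ne.symm h1), beq_eq_false_iff_ne.mpr (Ne.symm h2),
              beq_eq_false_iff_ne.mpr (Ne.symm h3)]
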